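-- pv_equiv track=rewrite | github.com/B-S-Arnold/bugHunt | laCucaracha/injector.py | get_block_lines
-- ===== SOURCE A (Python) =====
-- def get_block_lines(lines, start_index):
--     """
--     Given lines and a start index pointing to a block header line,
--     returns list of indices of lines belonging to the block (including the header).
--     """
--     block_lines = [start_index]
--     header_indent = len(lines[start_index]) - len(lines[start_index].lstrip(' '))
--
--     for i in range(start_index + 1, len(lines)):
--         line = lines[i]
--         # Consider blank lines as part of block for indentation consistency
--         if not line.strip():
--             block_lines.append(i)
--             continue
--
--         line_indent = len(line) - len(line.lstrip(' '))
--         # Lines with greater indent than header are part of the block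
--         if line_indent > header_indent:
--             block_lines.append(i)
--         else:
--             break
--
--     return block_lines
-- ===== SOURCE B (Python) =====
-- def get_block_lines(lines, start_index):
--     """Alternative decomposition: first collect ALL indices after start_index
--     whose line would belong to the block (blank, or indented deeper than the
--     header) in one filtering pass over the whole range, then take the
--     contiguous run of them starting right after start_index.  Correct because
--     the scanned range is consecutive, so the block is exactly the consecutive
--     prefix of the qualifying indices."""
--     header = lines[start_index]
--     header_indent = len(header) - len(header.lstrip(' '))
--     members = [i for i in range(start_index + 1, len(lines))
--                if not lines[i].strip()
--                or len(lines[i]) - len(lines[i].lstrip(' ')) > header_indent]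
--     block = [start_index]
--     for i in members:
--         if i != block[-1] + 1:
--             break
--         block.append(i)
--     return block
-- ===== Notes on version B (the rewrite author's own statement) =====
-- stated objective: alternative
-- what changed: A is one scan that appends indices and breaks at the first non-blank line with indent <= the header's; B is two staged passes: a filtering pass that collects every qualifying index in the whole remaining file (no early exit), then a run-extraction pass that keeps only the contiguous run of those indices starting right after start_index.
import Mathlib
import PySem

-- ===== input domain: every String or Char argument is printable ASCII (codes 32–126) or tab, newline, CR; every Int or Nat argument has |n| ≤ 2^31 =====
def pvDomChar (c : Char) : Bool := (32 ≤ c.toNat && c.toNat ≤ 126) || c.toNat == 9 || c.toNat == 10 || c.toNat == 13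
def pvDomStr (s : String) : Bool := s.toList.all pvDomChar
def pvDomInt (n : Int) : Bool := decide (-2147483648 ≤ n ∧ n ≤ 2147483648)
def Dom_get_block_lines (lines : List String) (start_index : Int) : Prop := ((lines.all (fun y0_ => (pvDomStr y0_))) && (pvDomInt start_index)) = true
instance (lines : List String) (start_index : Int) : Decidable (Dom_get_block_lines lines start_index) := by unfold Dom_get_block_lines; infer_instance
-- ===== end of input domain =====

-- B collects all qualifying indices of the remaining file in one filtering pass, then keeps the contiguous run after start_index, instead of A's append-and-break scan (objective: alternative).

-- ===== PORT A =====
-- exact hand port: len(s) - len(s.lstrip(' ')) — lstrip(' ') drops leading spaces only, so this is the leading-space count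
def pvIndent (s : String) : Int := (PySem.Str.len s) - ((s.toList.dropWhile (fun c => c == ' ')).length : Int)

-- A's loop over range(start_index+1, len(lines)): append, or break by returning the accumulator
def pvLoopA (lines : List String) (hdr : Int) : List Int → List Int → List Int
  | acc, [] => acc
  | acc, i :: rest =>
    let line := PySem.List.pyGetD lines i ""
    if PySem.Str.strip line == "" then pvLoopA lines hdr (acc ++ [i]) rest
    else if hdr < pvIndent line then pvLoopA lines hdr (acc ++ [i]) rest
    else acc

def get_block_lines (lines : List String) (start_index : Int) : List Int :=
  match PySem.List.pyGet? lines start_index with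
  | none => []  -- IndexError; excluded by Pre_
  | some header =>
    pvLoopA lines (pvIndent header) [start_index]
      (PySem.List.pyRange (start_index + 1) (lines.length : Int) 1)

-- ===== PORT B =====
-- the comprehension's condition: not lines[i].strip() or indent(lines[i]) > header_indent
def pvMember (lines : List String) (hdr : Int) (i : Int) : Bool :=
  (PySem.Str.strip (PySem.List.pyGetD lines i "") == "")
    || decide (hdr < pvIndent (PySem.List.pyGetD lines i ""))

-- B's second pass: 'for i in members: if i != block[-1] + 1: break; block.append(i)'
-- (block is always nonempty, so the pyGetD default is never used)
def pvRun : List Int → List Int → List Int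
  | block, [] => block
  | block, i :: rest =>
    if i ≠ PySem.List.pyGetD block (-1) 0 + 1 then block
    else pvRun (block ++ [i]) rest

def get_block_lines_alt (lines : List String) (start_index : Int) : List Int :=
  match PySem.List.pyGet? lines start_index with
  | none => []  -- IndexError; excluded by Pre_
  | some header =>
    let hdr := pvIndent header
    let members :=
      (PySem.List.pyRange (start_index + 1) (lines.length : Int) 1).filter (pvMember lines hdr)
    pvRun [start_index] members

-- ===== PRECONDITION & SPEC =====
-- exactly where lines[start_index] does not raise IndexError (negative indices allowed, Python wraparound)
def Pre_get_block_lines (lines : List String) (start_index : Int) : Prop :=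
  PySem.Raise.InRange lines.length start_index
instance (lines : List String) (start_index : Int) : Decidable (Pre_get_block_lines lines start_index) := by unfold Pre_get_block_lines; infer_instance
def pvWitness_get_block_lines : List String × Int := (["def f():", "  x = 1", "", "y"], 0)

def Spec_get_block_lines (lines : List String) (start_index : Int) (out : List Int) : Prop := out = get_block_lines_alt lines start_index
instance (lines : List String) (start_index : Int) (out : List Int) : Decidable (Spec_get_block_lines lines start_index out) := by unfold Spec_get_block_lines; infer_instance

-- ===== CLAIM (what is proved, stated in full; the proofs are below) =====
def Claim_equal_get_block_lines : Prop := ∀ (lines : List String) (start_index : Int), Dom_get_block_lines lines start_index → Pre_get_block_lines lines start_index → Spec_get_block_lines lines start_index (get_block_lines lines start_index)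

-- ===== LEMMAS AND PROOFS =====
theorem pvGetD_last (acc : List Int) (a : Int) (h : acc.getLast? = some a) :
    PySem.List.pyGetD acc (-1) 0 = a := by
  have hne : acc ≠ [] := by rintro rfl; simp at h
  rw [PySem.List.pyGetD_neg_one acc 0 hne]
  rw [List.getLast?_eq_some_getLast (l := acc) hne] at h
  exact Option.some.inj h

-- if the first member (if any) is not a + 1, the run stops immediately
theorem pvRun_stop (acc : List Int) (a : Int) (h : acc.getLast? = some a)
    (is : List Int) (his : ∀ j ∈ is, a + 1 < j) : pvRun acc is = acc := by
  cases is with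
  | nil => simp [pvRun]
  | cons j rest =>
    have : a + 1 < j := his j (by simp)
    rw [pvRun, if_pos (by rw [pvGetD_last acc a h]; omega)]

-- A's scan over range(a, n) equals the run-extraction over the filtered range
theorem pvLoopA_eq_run (lines : List String) (hdr : Int) (n : Int) :
    ∀ (k : Nat) (a : Int) (acc : List Int), (n - a).toNat = k →
    acc.getLast? = some (a - 1) →
    pvLoopA lines hdr acc (PySem.List.pyRange a n 1)
      = pvRun acc ((PySem.List.pyRange a n 1).filter (pvMember lines hdr)) := by
  intro k
  induction k with
  | zero =>
    intro a acc hk _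
    have hna : n ≤ a := by omega
    rw [PySem.List.pyRange_one_eq_nil hna]
    simp [pvLoopA, pvRun]
  | succ k ih =>
    intro a acc hk hlast
    have han : a < n := by omega
    rw [PySem.List.pyRange_one_cons han]
    by_cases hm : pvMember lines hdr a = true
    · -- a qualifies: A appends it, B's filter keeps it and the run consumes it
      have hstep : pvLoopA lines hdr acc (a :: PySem.List.pyRange (a + 1) n 1)
          = pvLoopA lines hdr (acc ++ [a]) (PySem.List.pyRange (a + 1) n 1) := by
        unfold pvMember at hm
        simp only [pvLoopA]
        rcases Bool.or_eq_true_iff.1 hm with h1 | h1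
        · rw [if_pos h1]
        · by_cases h2 : (PySem.Str.strip (PySem.List.pyGetD lines a "") == "") = true
          · rw [if_pos h2]
          · rw [if_neg h2, if_pos (by exact_mod_cast of_decide_eq_true h1)]
      rw [hstep, List.filter_cons_of_pos hm, pvRun,
          if_neg (by rw [pvGetD_last acc (a - 1) hlast]; omega)]
      exact ih (a + 1) (acc ++ [a]) (by omega) (by simp)
    · -- a breaks the block: A returns acc, B's run stops before any later member
      have hstep : pvLoopA lines hdr acc (a :: PySem.List.pyRange (a + 1) n 1) = acc := by
        unfold pvMember at hm
        simp only [Bool.or_eq_true_iff, decide_eq_true_eq, not_or] at hm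
        push Not at hm
        simp only [pvLoopA]
        rw [if_neg (by simpa using hm.1), if_neg (by omega)]
      rw [hstep, List.filter_cons_of_neg (by simpa using hm)]
      refine (pvRun_stop acc (a - 1) hlast _ ?_).symm
      intro j hj
      have := (PySem.List.mem_pyRange_one).1 (List.mem_of_mem_filter hj)
      omega

-- ===== VERDICT (by name: the statement is the Claim_ definition above) =====
theorem get_block_lines_spec : Claim_equal_get_block_lines := by
  intro lines start_index _hdom hpre
  unfold Spec_get_block_lines get_block_lines get_block_lines_alt
  obtain ⟨header, hget⟩ : ∃ h, PySem.List.pyGet? lines start_index = some h := by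
    rcases hh : PySem.List.pyGet? lines start_index with _ | h
    · exact absurd ((PySem.List.pyGet?_eq_none_iff _ _).1 hh) (not_not.2 hpre)
    · exact ⟨h, rfl⟩
  rw [hget]
  exact pvLoopA_eq_run lines (pvIndent header) (lines.length : Int)
    ((lines.length : Int) - (start_index + 1)).toNat (start_index + 1) [start_index] rfl
    (by simp)
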